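-- pv_equiv track=rewrite | github.com/CrawfordGroup/CCReorganization | setup.py | sanitize_cmake
-- ===== SOURCE A (Python) =====
-- def sanitize_cmake(output):
--     print_out = []
--
--     # Cut out a few warnings that are a bit annoying, GCC wont let us override them
--     warnings = [
--         ' warning: section "__textcoal_nt"',
--         'note: change section name to "__const"',
--         'change section name to "__text"',
--         'note: change section name to "__data"',
--         ' warning: section "__datacoal_nt"', 'warning: section "__const_coal"'
--     ]
--     x = 0
--     while x < len(output):
--
--         if any(warn in output[x] for warn in warnings):
--             x += 3
--             continue
--
--         print_out.append(output[x])
--         x += 1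
--
--     print_out = "\n".join(print_out)
--     return print_out
-- ===== SOURCE B (Python) =====
-- def sanitize_cmake(output):
--     warnings = [
--         ' warning: section "__textcoal_nt"',
--         'note: change section name to "__const"',
--         'change section name to "__text"',
--         'note: change section name to "__data"',
--         ' warning: section "__datacoal_nt"', 'warning: section "__const_coal"'
--     ]
--
--     def is_warn(line):
--         return any(warn in line for warn in warnings)
--
--     kept = []
--     rest = output
--     while True:
--         i = next((j for j, line in enumerate(rest) if is_warn(line)), None)
--         if i is None:
--             kept.extend(rest)
--             break
--         kept.extend(rest[:i])
--         rest = rest[i + 3:]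
--     return "\n".join(kept)
-- ===== Notes on version B (the rewrite author's own statement) =====
-- stated objective: alternative
-- what changed: Replaces A's per-line while loop (index jump x += 3 on a warning) with a block-structured algorithm: repeatedly locate the next warning line with a find-first search, keep the entire clean prefix in one slice, cut the 3-line slice at the warning, and recurse on the remainder.
import Mathlib
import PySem

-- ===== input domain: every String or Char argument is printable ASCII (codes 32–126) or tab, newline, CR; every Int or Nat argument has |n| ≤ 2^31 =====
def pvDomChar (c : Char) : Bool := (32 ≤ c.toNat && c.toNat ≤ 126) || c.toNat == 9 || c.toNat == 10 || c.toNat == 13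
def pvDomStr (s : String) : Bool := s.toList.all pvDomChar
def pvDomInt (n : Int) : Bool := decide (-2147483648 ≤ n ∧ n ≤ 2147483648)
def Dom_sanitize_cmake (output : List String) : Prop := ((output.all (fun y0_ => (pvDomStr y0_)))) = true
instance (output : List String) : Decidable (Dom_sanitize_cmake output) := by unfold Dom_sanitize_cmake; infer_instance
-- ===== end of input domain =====

-- B is a block-structured alternative: find the next warning line, keep the whole
-- clean prefix at once, cut the 3-line slice there, recurse on the remainder.

-- the warning substrings, shared constant of both programs
def pvWarnings : List String :=
  [" warning: section \"__textcoal_nt\"",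
   "note: change section name to \"__const\"",
   "change section name to \"__text\"",
   "note: change section name to \"__data\"",
   " warning: section \"__datacoal_nt\"", "warning: section \"__const_coal\""]

-- any(warn in line for warn in warnings)
def pvWarnLine (line : String) : Bool := pvWarnings.any (fun w => PySem.Str.isIn w line)

-- ===== PORT A =====
-- A's while loop over the index x: a warning hit advances x by 3 (here: drop the
-- line and the next two), otherwise append output[x] and advance by 1.
def sanitizeLoopA (print_out : List String) (rest : List String) : List String :=
  match rest with
  | [] => print_out
  | line :: t =>
      if pvWarnLine line then sanitizeLoopA print_out (t.drop 2)
      else sanitizeLoopA (print_out ++ [line]) t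
termination_by rest.length
decreasing_by
  all_goals simp

def sanitize_cmake (output : List String) : String :=
  PySem.Str.join "\n" (sanitizeLoopA [] output)

-- ===== PORT B =====
-- B's block loop: i = index of first warning line in rest (none if absent);
-- keep rest[:i] wholesale, continue with rest[i+3:].
def sanitizeLoopB (kept : List String) (rest : List String) : List String :=
  match h : rest.findIdx? pvWarnLine with
  | none => kept ++ rest
  | some i => sanitizeLoopB (kept ++ rest.take i) (rest.drop (i + 3))
termination_by rest.length
decreasing_by
  have hi : i < rest.length := by
    have := List.findIdx?_eq_some_iff_findIdx_eq.mp h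
    exact this.1
  simp only [List.length_drop]
  omega

def sanitize_cmake_alt (output : List String) : String :=
  PySem.Str.join "\n" (sanitizeLoopB [] output)

-- ===== PRECONDITION & SPEC =====
def Spec_sanitize_cmake (output : List String) (out : String) : Prop := out = sanitize_cmake_alt output
instance (output : List String) (out : String) : Decidable (Spec_sanitize_cmake output out) := by unfold Spec_sanitize_cmake; infer_instance

-- ===== CLAIM =====
def Claim_equal_sanitize_cmake : Prop := ∀ (output : List String), Dom_sanitize_cmake output → Spec_sanitize_cmake output (sanitize_cmake output)

-- ===== LEMMAS AND PROOFS =====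

-- pushing a clean line of B's block into the accumulator
-- unfolding sanitizeLoopB by the value of the find-first search
lemma loopB_none (kept rest : List String) (hf : rest.findIdx? pvWarnLine = none) :
    sanitizeLoopB kept rest = kept ++ rest := by
  rw [sanitizeLoopB]
  split
  · rfl
  · rename_i i hi; rw [hf] at hi; cases hi

lemma loopB_some (kept rest : List String) (i : Nat)
    (hf : rest.findIdx? pvWarnLine = some i) :
    sanitizeLoopB kept rest = sanitizeLoopB (kept ++ rest.take i) (rest.drop (i + 3)) := by
  rw [sanitizeLoopB]
  split
  · rename_i hi; rw [hf] at hi; cases hi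
  · rename_i j hj; rw [hf] at hj; cases hj; rfl

lemma loopB_cons_clean (h : String) (t kept : List String) (hw : pvWarnLine h = false) :
    sanitizeLoopB kept (h :: t) = sanitizeLoopB (kept ++ [h]) t := by
  cases hf : t.findIdx? pvWarnLine with
  | none =>
      rw [loopB_none (kept ++ [h]) t hf, loopB_none kept (h :: t)
        (by simp [List.findIdx?_cons, hw, hf])]
      simp
  | some i =>
      rw [loopB_some (kept ++ [h]) t i hf, loopB_some kept (h :: t) (i + 1)
        (by simp [List.findIdx?_cons, hw, hf])]
      rw [show i + 1 + 3 = (i + 3) + 1 from rfl, List.drop_succ_cons,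
        List.take_succ_cons]
      simp

lemma loopB_cons_warn (h : String) (t kept : List String) (hw : pvWarnLine h = true) :
    sanitizeLoopB kept (h :: t) = sanitizeLoopB kept (t.drop 2) := by
  rw [loopB_some kept (h :: t) 0 (by simp [List.findIdx?_cons, hw])]
  simp [List.drop_succ_cons]

lemma loopA_eq_loopB : ∀ (n : Nat) (rest : List String), rest.length ≤ n →
    ∀ (kept : List String), sanitizeLoopA kept rest = sanitizeLoopB kept rest := by
  intro n
  induction n with
  | zero =>
      intro rest hl kept
      have : rest = [] := List.eq_nil_of_length_eq_zero (Nat.le_zero.mp hl)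
      subst this
      rw [sanitizeLoopA, sanitizeLoopB]; simp
  | succ m ih =>
      intro rest hl kept
      cases rest with
      | nil => rw [sanitizeLoopA, sanitizeLoopB]; simp
      | cons h t =>
          by_cases hw : pvWarnLine h
          · rw [sanitizeLoopA]
            simp only [hw, if_true]
            rw [loopB_cons_warn h t kept hw,
                ih (t.drop 2) (by simp at hl ⊢; omega) kept]
          · rw [sanitizeLoopA]
            simp only [hw, Bool.false_eq_true, if_false]
            rw [loopB_cons_clean h t kept (by simpa using hw),
                ih t (by simp at hl; omega)]

-- ===== VERDICT =====
theorem sanitize_cmake_spec : Claim_equal_sanitize_cmake := by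
  intro output _
  unfold Spec_sanitize_cmake sanitize_cmake sanitize_cmake_alt
  rw [loopA_eq_loopB output.length output (le_refl _)]
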